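-- pv_equiv track=rewrite | github.com/yuxiang660/learning-linux | the_probability_lifesaver/code/four_square_sum/violent_solution.py | get_four_square_num
-- ===== SOURCE A (Python) =====
-- import math
--
-- def get_four_square_num(test_num):
--     results = []
--     for a in range(int(math.sqrt(test_num)) + 1):
--         for b in range(a+1):
--             for c in range(b+1):
--                 for d in range(c+1):
--                     if (a**2 + b**2 + c**2 + d**2) == test_num:
--                         results.append([a, b, c, d])
--     return results
-- ===== SOURCE B (Python) =====
-- import math
--
-- def _hit(n, a, b, c):
--     # the unique candidate d for a*a+b*b+c*c+d*d == n with 0 <= d <= c, if any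
--     r = n - a * a - b * b - c * c
--     if r < 0:
--         return []
--     d = math.isqrt(r)
--     return [[a, b, c, d]] if d * d == r and d <= c else []
--
-- def get_four_square_num(test_num):
--     return [sol
--             for a in range(math.isqrt(test_num) + 1)
--             for b in range(a + 1)
--             for c in range(b + 1)
--             for sol in _hit(test_num, a, b, c)]
-- ===== Notes on version B (the rewrite author's own statement) =====
-- stated objective: faster
-- what changed: B drops A's innermost d-loop: for each (a,b,c) it computes the remainder r = n-a^2-b^2-c^2 once and tests it for being a perfect square with math.isqrt, emitting the unique candidate d, turning O(n^2) into O(n^1.5).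
import Mathlib
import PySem

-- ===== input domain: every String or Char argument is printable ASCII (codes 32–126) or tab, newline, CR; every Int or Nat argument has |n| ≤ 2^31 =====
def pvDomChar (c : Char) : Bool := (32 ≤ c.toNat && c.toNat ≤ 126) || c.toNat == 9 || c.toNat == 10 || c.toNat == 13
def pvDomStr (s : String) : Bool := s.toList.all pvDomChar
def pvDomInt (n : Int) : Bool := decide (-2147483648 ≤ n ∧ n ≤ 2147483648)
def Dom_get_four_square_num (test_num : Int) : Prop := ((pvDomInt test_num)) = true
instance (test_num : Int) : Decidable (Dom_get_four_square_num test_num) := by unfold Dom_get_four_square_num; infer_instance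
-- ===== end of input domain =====

-- B replaces A's innermost d-loop by a single integer-sqrt perfect-square test per (a,b,c): faster (asymptotic).

-- ===== PORT A =====
-- int(math.sqrt(test_num)) is ported as Int.sqrt: exact for 0 ≤ test_num ≤ 2^31 (the Dom ∩ Pre_ range),
-- where the double-precision sqrt is exact enough that int() of it equals the integer square root.
def get_four_square_num (test_num : Int) : List (List Int) :=
  (PySem.List.pyRange 0 (Int.sqrt test_num + 1) 1).foldl (fun res a =>
    (PySem.List.pyRange 0 (a + 1) 1).foldl (fun res b =>
      (PySem.List.pyRange 0 (b + 1) 1).foldl (fun res c =>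
        (PySem.List.pyRange 0 (c + 1) 1).foldl (fun res d =>
          if a ^ 2 + b ^ 2 + c ^ 2 + d ^ 2 = test_num then res ++ [[a, b, c, d]] else res)
          res) res) res) []

-- ===== PORT B =====
-- helper _hit from Source B (math.isqrt = Int.sqrt, exact)
def pvHit (n a b c : Int) : List (List Int) :=
  let r := n - a * a - b * b - c * c
  if r < 0 then []
  else
    let d := Int.sqrt r
    if d * d = r ∧ d ≤ c then [[a, b, c, d]] else []

def get_four_square_num_alt (test_num : Int) : List (List Int) :=
  (PySem.List.pyRange 0 (Int.sqrt test_num + 1) 1).flatMap (fun a =>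
    (PySem.List.pyRange 0 (a + 1) 1).flatMap (fun b =>
      (PySem.List.pyRange 0 (b + 1) 1).flatMap (fun c => pvHit test_num a b c)))

-- ===== PRECONDITION & SPEC =====
-- math.sqrt (and B's math.isqrt) raise ValueError on negative input, so Pre_ excludes test_num < 0.
def Pre_get_four_square_num (test_num : Int) : Prop := 0 ≤ test_num
instance (test_num : Int) : Decidable (Pre_get_four_square_num test_num) := by unfold Pre_get_four_square_num; infer_instance
def pvWitness_get_four_square_num : Int := 15

def Spec_get_four_square_num (test_num : Int) (out : List (List Int)) : Prop := out = get_four_square_num_alt test_num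
instance (test_num : Int) (out : List (List Int)) : Decidable (Spec_get_four_square_num test_num out) := by unfold Spec_get_four_square_num; infer_instance

-- ===== CLAIM (what is proved, stated in full; the proofs are below) =====
def Claim_equal_get_four_square_num : Prop := ∀ (test_num : Int), Dom_get_four_square_num test_num → Pre_get_four_square_num test_num → Spec_get_four_square_num test_num (get_four_square_num test_num)

-- ===== LEMMAS AND PROOFS =====

-- The d-values in [0, c] solving a²+b²+c²+d² = n are exactly what pvHit returns.
lemma pv_inner_eq (n a b c : Int) :
    ((PySem.List.pyRange 0 (c + 1) 1).filter
        (fun d => decide (a ^ 2 + b ^ 2 + c ^ 2 + d ^ 2 = n))).map (fun d => [a, b, c, d])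
      = pvHit n a b c := by
  have hp : ∀ d : Int, (a ^ 2 + b ^ 2 + c ^ 2 + d ^ 2 = n) ↔ (d * d = n - a * a - b * b - c * c) := by
    intro d; constructor <;> intro h <;> nlinarith [sq_nonneg a, sq_nonneg b]
  set r := n - a * a - b * b - c * c with hr
  by_cases hneg : r < 0
  · rw [List.filter_eq_nil_iff.mpr, List.map_nil]
    · simp [pvHit, ← hr, hneg]
    · intro d _ hd
      have := (hp d).mp (of_decide_eq_true hd)
      nlinarith [mul_self_nonneg d]
  · rw [not_lt] at hneg
    by_cases hsq : Int.sqrt r * Int.sqrt r = r ∧ Int.sqrt r ≤ c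
    · obtain ⟨h1, h2⟩ := hsq
      have hs0 : 0 ≤ Int.sqrt r := Int.sqrt_nonneg r
      have hmem : Int.sqrt r ∈ PySem.List.pyRange 0 (c + 1) 1 :=
        (PySem.List.mem_pyRange_one).mpr ⟨hs0, by omega⟩
      have hfc : ((PySem.List.pyRange 0 (c + 1) 1).filter
          (fun d => decide (a ^ 2 + b ^ 2 + c ^ 2 + d ^ 2 = n)))
          = (PySem.List.pyRange 0 (c + 1) 1).filter (fun d => d == Int.sqrt r) := by
        apply List.filter_congr
        intro d hd
        have hd0 : 0 ≤ d := ((PySem.List.mem_pyRange_one).mp hd).1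
        rw [Bool.beq_eq_decide_eq d (Int.sqrt r), decide_eq_decide, hp d]
        constructor
        · intro h
          have : d * d = Int.sqrt r * Int.sqrt r := by rw [h, h1]
          rcases mul_self_eq_mul_self_iff.mp this with h' | h' <;> omega
        · intro h; rw [h, h1]
      rw [hfc]
      have : (PySem.List.pyRange 0 (c + 1) 1).filter (fun d => d == Int.sqrt r)
          = List.replicate ((PySem.List.pyRange 0 (c + 1) 1).count (Int.sqrt r)) (Int.sqrt r) := by
        simpa using List.filter_beq (l := PySem.List.pyRange 0 (c + 1) 1) (a := Int.sqrt r)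
      rw [this, List.count_eq_one_of_mem (PySem.List.nodup_pyRange_one 0 (c+1)) hmem]
      simp [pvHit, ← hr, h1, h2, not_lt.mpr hneg]
    · rw [List.filter_eq_nil_iff.mpr, List.map_nil]
      · simp only [pvHit, ← hr]
        rw [if_neg (not_lt.mpr hneg), if_neg hsq]
      · intro d hd hdp
        have hd' := (hp d).mp (of_decide_eq_true hdp)
        obtain ⟨hd0, hdc⟩ := (PySem.List.mem_pyRange_one).mp hd
        have hsd : Int.sqrt r = d := by
          rw [← hd', Int.sqrt_eq]
          omega
        exact hsq ⟨by rw [hsd]; omega, by omega⟩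

-- A's innermost loop equals appending pvHit.
lemma pv_dloop_eq (n a b c : Int) (res : List (List Int)) :
    (PySem.List.pyRange 0 (c + 1) 1).foldl (fun res d =>
        if a ^ 2 + b ^ 2 + c ^ 2 + d ^ 2 = n then res ++ [[a, b, c, d]] else res) res
      = res ++ pvHit n a b c := by
  rw [PySem.List.foldl_append_ite, pv_inner_eq]

-- ===== VERDICT (by name: the statement is the Claim_ definition above) =====
theorem get_four_square_num_spec : Claim_equal_get_four_square_num := by
  intro n _ _
  unfold Spec_get_four_square_num get_four_square_num get_four_square_num_alt
  simp only [pv_dloop_eq, PySem.List.foldl_append_eq_flatMap, List.nil_append]
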